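-- pv_equiv track=rewrite | github.com/stopwhispering/plants-backend | plants_tagger/services/exif_services.py | encode_keywords_tag
-- ===== SOURCE A (Python) =====
-- def encode_keywords_tag(keywords: list):
--     """reverse decode_keywords_tag function"""
--     ord_list = []
--     for keyword in keywords:
--         ord_list_new = [ord(t) for t in keyword]
--         if ord_list:
--             ord_list = ord_list + [59] + ord_list_new  # add ; as separator
--         else:
--             ord_list = ord_list_new
--
--     # add \x00 (0) after each element
--     ord_list_final = []
--     for item in ord_list:
--         ord_list_final.append(item)
--         ord_list_final.append(0)
--     ord_list_final.append(0)
--     ord_list_final.append(0)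
--
--     return tuple(ord_list_final)
-- ===== SOURCE B (Python) =====
-- def encode_keywords_tag(keywords: list):
--     """reverse decode_keywords_tag function"""
--     text = ';'.join(keywords)
--     result = []
--     for ch in text:
--         result += [ord(ch), 0]
--     result += [0, 0]
--     return tuple(result)
-- ===== Notes on version B (the rewrite author's own statement) =====
-- stated objective: faster
-- what changed: B joins the keywords with ';' into one string and expands it in a single flat (ord, 0) pass, replacing A's quadratic repeated-list-concatenation accumulation plus second interleaving loop; Pre_ excludes lists of two or more keywords whose first keyword is '', an unspecified corner of the tag format where A emits no separators for leading empty keywords while B's join keeps one per keyword and neither value is more correct.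
-- outside the precondition, e.g. on encode_keywords_tag(['', 'a']): A returns (97, 0, 0, 0), B returns (59, 0, 97, 0, 0, 0); on encode_keywords_tag(['', '']): A returns (0, 0), B returns (59, 0, 0, 0)
import Mathlib
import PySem

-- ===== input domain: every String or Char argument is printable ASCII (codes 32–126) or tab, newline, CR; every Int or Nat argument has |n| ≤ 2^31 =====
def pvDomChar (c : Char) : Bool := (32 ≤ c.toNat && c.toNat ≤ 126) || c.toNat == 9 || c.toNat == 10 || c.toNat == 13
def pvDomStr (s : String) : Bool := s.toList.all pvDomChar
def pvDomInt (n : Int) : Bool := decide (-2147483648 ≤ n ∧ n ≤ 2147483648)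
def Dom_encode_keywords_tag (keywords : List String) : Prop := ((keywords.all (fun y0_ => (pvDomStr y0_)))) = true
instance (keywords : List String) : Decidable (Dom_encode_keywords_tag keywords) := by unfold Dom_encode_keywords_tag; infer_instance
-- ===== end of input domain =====

-- B joins the keywords with ';' and expands in one flat (ord, 0) pass, replacing A's
-- quadratic repeated-concatenation accumulation; Pre_ excludes the unspecified corner of
-- lists of ≥ 2 keywords whose first keyword is empty (see the sentence above Pre_).


-- ===== PORT A =====
def encode_keywords_tag (keywords : List String) : List Int :=
  let ord_list := keywords.foldl (fun acc keyword =>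
    let ord_list_new := keyword.toList.map (fun t => (t.toNat : Int))
    if acc ≠ [] then acc ++ [59] ++ ord_list_new else ord_list_new) []
  let ord_list_final := ord_list.foldl (fun acc item => acc ++ [item, 0]) []
  ord_list_final ++ [0] ++ [0]

-- ===== PORT B =====
def encode_keywords_tag_alt (keywords : List String) : List Int :=
  let text := PySem.Str.join ";" keywords
  let result := text.toList.foldl (fun acc ch => acc ++ [(ch.toNat : Int), 0]) []
  result ++ [0, 0]

-- ===== PRECONDITION & SPEC =====
-- Pre_ excludes lists of two or more keywords whose first keyword is '': how empty
-- leading keywords are encoded is an unspecified corner of the tag format (A emits no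
-- separators for them, B's join keeps one per keyword) and neither value is more correct.
def Pre_encode_keywords_tag (keywords : List String) : Prop :=
  ¬ (2 ≤ keywords.length ∧ keywords.head? = some "")
instance (keywords : List String) : Decidable (Pre_encode_keywords_tag keywords) := by
  unfold Pre_encode_keywords_tag; infer_instance

def pvWitness_encode_keywords_tag : List String := ["plant", "sunny"]

def Spec_encode_keywords_tag (keywords : List String) (out : List Int) : Prop :=
  out = encode_keywords_tag_alt keywords
instance (keywords : List String) (out : List Int) : Decidable (Spec_encode_keywords_tag keywords out) := by
  unfold Spec_encode_keywords_tag; infer_instance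

-- ===== CLAIM (what is proved, stated in full; the proofs are below) =====
def Claim_equal_encode_keywords_tag : Prop :=
  ∀ (keywords : List String), Dom_encode_keywords_tag keywords →
    Pre_encode_keywords_tag keywords →
    Spec_encode_keywords_tag keywords (encode_keywords_tag keywords)

-- ===== LEMMAS AND PROOFS =====

-- leading empty keywords dropped by A's first loop (proof-side characterisation)
def ekTrim : List String → List String
  | [] => []
  | k :: ks => if k = "" then ekTrim ks else k :: ks

-- join with a one-char separator is the head followed by the separator-prefixed tails
theorem ek_join_flat (c : Char) (p : List Char) (ps : List (List Char)) :
    PySem.Chars.join [c] (p :: ps) = p ++ ps.flatMap (fun q => c :: q) := by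
  induction ps generalizing p with
  | nil => simp [PySem.Chars.join_singleton]
  | cons q qs ih =>
    rw [PySem.Chars.join_cons_cons, ih]
    simp

-- A's first loop, once the accumulator is non-empty
theorem ekA_fold_ne (ks : List String) (acc : List Int) (h : acc ≠ []) :
    ks.foldl (fun acc keyword =>
      let new := keyword.toList.map (fun t => (t.toNat : Int))
      if acc ≠ [] then acc ++ [59] ++ new else new) acc
    = acc ++ ks.flatMap (fun kw => (59 : Int) :: kw.toList.map (fun t => (t.toNat : Int))) := by
  induction ks generalizing acc with
  | nil => simp
  | cons k ks ih =>
    simp only [List.foldl_cons, List.flatMap_cons, if_pos h]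
    rw [ih _ (by simp)]
    simp

-- A's first loop skips leading empty keywords
theorem ekA_fold_trim (ks : List String) :
    ks.foldl (fun acc keyword =>
      let new := keyword.toList.map (fun t => (t.toNat : Int))
      if acc ≠ [] then acc ++ [59] ++ new else new) []
    = (ekTrim ks).foldl (fun acc keyword =>
      let new := keyword.toList.map (fun t => (t.toNat : Int))
      if acc ≠ [] then acc ++ [59] ++ new else new) [] := by
  induction ks with
  | nil => rfl
  | cons k ks ih =>
    by_cases hk : k = ""
    · subst hk; simpa [ekTrim] using ih
    · simp [ekTrim, hk]

-- A's accumulated ord list is the ord image of the ';'-join of the trimmed keywords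
theorem ekA_eq_map_join (ks : List String) :
    ks.foldl (fun acc keyword =>
      let new := keyword.toList.map (fun t => (t.toNat : Int))
      if acc ≠ [] then acc ++ [59] ++ new else new) []
    = (PySem.Chars.join [Char.ofNat 59] ((ekTrim ks).map String.toList)).map
        (fun t => (t.toNat : Int)) := by
  rw [ekA_fold_trim]
  cases htrim : ekTrim ks with
  | nil => simp [PySem.Chars.join_nil]
  | cons k rest =>
    have hk : k ≠ "" := by
      induction ks with
      | nil => simp [ekTrim] at htrim
      | cons a as ih =>
        by_cases ha : a = ""
        · exact ih (by simpa [ekTrim, ha] using htrim)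
        · simp only [ekTrim, if_neg ha, List.cons.injEq] at htrim
          exact htrim.1 ▸ ha
    have hkl : k.toList ≠ [] := fun h => hk (String.toList_eq_nil_iff.mp h)
    rw [List.map_cons, ek_join_flat]
    simp only [List.foldl_cons, List.map_append]
    rw [if_neg (by simp)]
    by_cases hmap : k.toList.map (fun t => ((t.toNat : Int))) = []
    · exact absurd (by simpa using hmap) hkl
    · rw [ekA_fold_ne rest _ hmap]
      simp [List.flatMap_map, List.map_flatMap]

-- ===== VERDICT (by name: the statement is the Claim_ definition above) =====
theorem encode_keywords_tag_spec : Claim_equal_encode_keywords_tag := by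
  intro keywords _ hPre
  show encode_keywords_tag keywords = encode_keywords_tag_alt keywords
  rcases keywords with _ | ⟨k, rest⟩
  · decide
  · by_cases hk : k = ""
    · subst hk
      cases rest with
      | nil => decide
      | cons k' rest' => exact absurd ⟨by simp, rfl⟩ hPre
    · have htrim : ekTrim (k :: rest) = k :: rest := by simp [ekTrim, hk]
      unfold encode_keywords_tag encode_keywords_tag_alt
      simp only [PySem.Str.toList_join]
      rw [ekA_eq_map_join, htrim, List.foldl_map]
      have h1 : (";" : String).toList = [Char.ofNat 59] := by decide
      rw [h1]
      simp
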